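-- pv_equiv track=rewrite | github.com/runport-io/ipfeb22 | list_loader.py | turn_entries_into_dict
-- ===== SOURCE A (Python) =====
-- BRAND = "Brand"
--
-- GROUP = "Group"
--
-- def turn_entries_into_dict(entries, keep_data=True):
--     result = dict()
--     for entry in entries:
--         group_name = entry[GROUP]
--         brand_name = entry[BRAND]
--         group = result.setdefault(group_name, set())
--         group.add(brand_name)
--         # meta data? each brand should be a dictionary here? or an obj?
--
--     return result
-- ===== SOURCE B (Python) =====
-- BRAND = "Brand"
--
-- GROUP = "Group"
--
-- def turn_entries_into_dict(entries, keep_data=True):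
--     # Two-pass restructuring: first the distinct group names in first-occurrence
--     # order, then one filtered scan of entries per group.
--     groups = dict.fromkeys(e[GROUP] for e in entries)
--     return {g: {e[BRAND] for e in entries if e[GROUP] == g} for g in groups}
-- ===== Notes on version B (the rewrite author's own statement) =====
-- stated objective: alternative
-- what changed: A builds the dict in one accumulating pass with setdefault+add; B first collects the distinct group names in one pass and then rebuilds each group's brand set with a separate filtered scan of entries per group.
import Mathlib
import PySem

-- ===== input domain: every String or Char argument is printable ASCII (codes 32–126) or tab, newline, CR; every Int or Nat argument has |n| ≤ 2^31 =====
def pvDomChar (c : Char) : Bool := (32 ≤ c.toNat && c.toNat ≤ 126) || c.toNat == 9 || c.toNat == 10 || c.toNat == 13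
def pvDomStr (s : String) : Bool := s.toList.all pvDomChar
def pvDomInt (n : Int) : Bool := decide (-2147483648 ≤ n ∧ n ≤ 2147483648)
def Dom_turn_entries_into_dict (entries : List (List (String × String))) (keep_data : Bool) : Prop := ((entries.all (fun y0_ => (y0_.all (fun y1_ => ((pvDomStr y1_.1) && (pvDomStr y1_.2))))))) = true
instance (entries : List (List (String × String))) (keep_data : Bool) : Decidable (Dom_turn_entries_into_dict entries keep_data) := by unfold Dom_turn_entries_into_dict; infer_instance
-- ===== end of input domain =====

-- B replaces A's single accumulating setdefault/add pass by a distinct-groups pass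
-- followed by one filtered scan of entries per group (alternative decomposition, same result).


-- ===== PORT A =====
-- entry[GROUP] / entry[BRAND]: KeyError (= none) is excluded by Pre_, so getD with a dummy default is exact on Pre_.
def turn_entries_into_dict (entries : List (List (String × String))) (keep_data : Bool) : List (String × List String) :=
  (entries.foldl
    (fun (result : PySem.Dict String (PySem.Set String)) entry =>
      let group_name := (PySem.Dict.mk entry).getD "Group" ""
      let brand_name := (PySem.Dict.mk entry).getD "Brand" ""
      -- group = result.setdefault(group_name, set()); group.add(brand_name)
      result.modify group_name PySem.Set.empty (fun group => PySem.Set.add group brand_name))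
    PySem.Dict.empty).items

-- ===== PORT B =====
-- groups = dict.fromkeys(e[GROUP] for e in entries); then one filtered scan per group.
def turn_entries_into_dict_alt (entries : List (List (String × String))) (keep_data : Bool) : List (String × List String) :=
  let groups := PySem.Set.ofList (entries.map (fun e => (PySem.Dict.mk e).getD "Group" ""))
  groups.map (fun g =>
    (g, PySem.Set.ofList
          ((entries.filter (fun e => (PySem.Dict.mk e).getD "Group" "" == g)).map
            (fun e => (PySem.Dict.mk e).getD "Brand" ""))))

-- ===== PRECONDITION & SPEC =====
-- Pre_ excludes exactly the entries missing the "Group" or "Brand" key, on which Python A raises KeyError.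
def Pre_turn_entries_into_dict (entries : List (List (String × String))) (keep_data : Bool) : Prop :=
  (entries.all (fun e => (PySem.Dict.mk e).contains "Group" && (PySem.Dict.mk e).contains "Brand")) = true
instance (entries : List (List (String × String))) (keep_data : Bool) : Decidable (Pre_turn_entries_into_dict entries keep_data) := by unfold Pre_turn_entries_into_dict; infer_instance

def pvWitness_turn_entries_into_dict : (List (List (String × String))) × Bool :=
  ([[("Group", "g1"), ("Brand", "b1")], [("Group", "g1"), ("Brand", "b2")]], true)

def Spec_turn_entries_into_dict (entries : List (List (String × String))) (keep_data : Bool) (out : List (String × List String)) : Prop := out = turn_entries_into_dict_alt entries keep_data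
instance (entries : List (List (String × String))) (keep_data : Bool) (out : List (String × List String)) : Decidable (Spec_turn_entries_into_dict entries keep_data out) := by unfold Spec_turn_entries_into_dict; infer_instance

-- ===== CLAIM (what is proved, stated in full; the proofs are below) =====
def Claim_equal_turn_entries_into_dict : Prop := ∀ (entries : List (List (String × String))) (keep_data : Bool), Dom_turn_entries_into_dict entries keep_data → Pre_turn_entries_into_dict entries keep_data → Spec_turn_entries_into_dict entries keep_data (turn_entries_into_dict entries keep_data)

-- ===== LEMMAS AND PROOFS =====

-- the Group/Brand projections of an entry (proof-side shorthand)
def pvKey (e : List (String × String)) : String := (PySem.Dict.mk e).getD "Group" ""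
def pvBrand (e : List (String × String)) : String := (PySem.Dict.mk e).getD "Brand" ""

-- A's accumulating loop
def pvStep (d : PySem.Dict String (PySem.Set String)) (e : List (String × String)) :
    PySem.Dict String (PySem.Set String) :=
  d.modify (pvKey e) PySem.Set.empty (fun s => PySem.Set.add s (pvBrand e))

-- B's value for a group g over a list of entries
def pvVal (l : List (List (String × String))) (g : String) : PySem.Set String :=
  PySem.Set.ofList ((l.filter (fun e => pvKey e == g)).map pvBrand)

lemma pvKeys_fold (l : List (List (String × String))) :
    (l.foldl pvStep PySem.Dict.empty).keys = PySem.Set.ofList (l.map pvKey) := by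
  have h := PySem.Dict.keys_foldl_insert_key (l := l) (key := pvKey)
      (f := fun d e => PySem.Set.add (d.getD (pvKey e) PySem.Set.empty) (pvBrand e))
      (d := (PySem.Dict.empty : PySem.Dict String (PySem.Set String)))
  simpa [pvStep, PySem.Dict.modify, PySem.Dict.keys_empty, PySem.Set.update,
    PySem.Set.ofList] using h

lemma pvNodup_fold (l : List (List (String × String))) :
    (l.foldl pvStep PySem.Dict.empty).keys.Nodup := by
  have h := PySem.Dict.nodup_keys_foldl_insert_key (l := l) (key := pvKey)
      (f := fun d e => PySem.Set.add (d.getD (pvKey e) PySem.Set.empty) (pvBrand e))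
      (d := (PySem.Dict.empty : PySem.Dict String (PySem.Set String)))
      (by simp [PySem.Dict.keys_empty])
  simpa [pvStep, PySem.Dict.modify] using h

-- the heart: A's fold has exactly B's items
lemma pvFold_items (l : List (List (String × String))) :
    (l.foldl pvStep PySem.Dict.empty).items
      = (PySem.Set.ofList (l.map pvKey)).map (fun g => (g, pvVal l g)) := by
  induction l using List.reverseRecOn with
  | nil => simp [PySem.Dict.empty, PySem.Set.ofList, PySem.Set.empty]
  | append_singleton l e ih =>
      have hfold : (l ++ [e]).foldl pvStep PySem.Dict.empty
          = pvStep (l.foldl pvStep PySem.Dict.empty) e := by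
        simp [List.foldl_append]
      set d := l.foldl pvStep PySem.Dict.empty with hd
      have hkeys : d.keys = PySem.Set.ofList (l.map pvKey) := pvKeys_fold l
      have hnd : d.keys.Nodup := pvNodup_fold l
      have hG : PySem.Set.ofList ((l ++ [e]).map pvKey)
          = PySem.Set.add (PySem.Set.ofList (l.map pvKey)) (pvKey e) := by
        simp [PySem.Set.ofList, List.foldl_append]
      have hValSnoc : ∀ g, pvVal (l ++ [e]) g
          = if pvKey e == g then PySem.Set.add (pvVal l g) (pvBrand e) else pvVal l g := by
        intro g
        by_cases hg : pvKey e == g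
        · simp [pvVal, List.filter_append, hg, PySem.Set.ofList, List.foldl_append]
        · simp [pvVal, List.filter_append, hg]
      by_cases hmem : pvKey e ∈ l.map pvKey
      · -- the group already exists: insert overwrites in place
        have hcont : d.contains (pvKey e) = true := by
          rw [PySem.Dict.contains_eq_decide_mem_keys, hkeys]
          simp [PySem.Set.mem_ofList, hmem]
        have hgetD : d.getD (pvKey e) PySem.Set.empty = pvVal l (pvKey e) :=
          PySem.Dict.getD_of_mem_items d
            (by rw [ih]
                exact List.mem_map_of_mem ((PySem.Set.mem_ofList _ _).mpr hmem)) hnd _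
        rw [hfold]
        show (d.insert (pvKey e) (PySem.Set.add (d.getD (pvKey e) PySem.Set.empty) (pvBrand e))).items = _
        rw [PySem.Dict.items_insert_of_contains _ _ hcont, ih, hgetD, hG,
          PySem.Set.add_of_mem ((PySem.Set.mem_ofList _ _).mpr hmem), List.map_map]
        apply List.map_congr_left
        intro g _
        by_cases hgk : g = pvKey e
        · subst hgk
          simp [Function.comp, hValSnoc (pvKey e)]
        · have h1 : (g == pvKey e) = false := by simpa using hgk
          have h2 : (pvKey e == g) = false := by simpa using Ne.symm hgk
          simp [Function.comp, hValSnoc g, h1, h2]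
      · -- a fresh group: insert appends
        have hcont : d.contains (pvKey e) = false := by
          rw [PySem.Dict.contains_eq_decide_mem_keys, hkeys]
          simp [PySem.Set.mem_ofList, hmem]
        have hgetD : d.getD (pvKey e) PySem.Set.empty = PySem.Set.empty :=
          PySem.Dict.getD_of_not_contains d _ hcont
        have hfilt : l.filter (fun e' => pvKey e' == pvKey e) = [] := by
          rw [List.filter_eq_nil_iff]
          intro a ha hk
          exact hmem (by simpa [eq_of_beq hk] using List.mem_map_of_mem (f := pvKey) ha)
        rw [hfold]
        show (d.insert (pvKey e) (PySem.Set.add (d.getD (pvKey e) PySem.Set.empty) (pvBrand e))).items = _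
        rw [PySem.Dict.items_insert_of_not_contains _ _ hcont, ih, hgetD, hG,
          PySem.Set.add_of_not_mem (s := PySem.Set.ofList (l.map pvKey))
            (by simp [PySem.Set.mem_ofList, hmem]),
          List.map_append]
        congr 1
        · apply List.map_congr_left
          intro g hgmem
          have hne : (pvKey e == g) = false := by
            simp only [beq_eq_false_iff_ne, ne_eq]
            rintro rfl
            exact hmem (by simpa [PySem.Set.mem_ofList] using hgmem)
          simp [hValSnoc g, hne]
        · simp [pvVal, hfilt, PySem.Set.add, PySem.Set.ofList, PySem.Set.empty]

-- ===== VERDICT (by name: the statement is the Claim_ definition above) =====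
theorem turn_entries_into_dict_spec : Claim_equal_turn_entries_into_dict := by
  intro entries keep_data _ _
  unfold Spec_turn_entries_into_dict turn_entries_into_dict turn_entries_into_dict_alt
  have h := pvFold_items entries
  simpa [pvStep, pvKey, pvBrand, pvVal] using h
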